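-- pv_equiv track=rewrite | github.com/sr8510/Ribo-seq-analysis | Protein prediction for SCRT events/extract_cds.py | extract_extended_cds
-- ===== SOURCE A (Python) =====
-- def extract_extended_cds(sequence, stop_pos):
--     """Extracts the extended CDS by continuing past the first stop codon until a second stop codon is found."""
--     stop_codons = {"TAA", "TAG", "TGA"}
--     extended_seq = ""
--
--     for i in range(stop_pos, len(sequence) - 2, 3):
--         codon = sequence[i:i+3]
--         if codon in stop_codons:
--             return extended_seq  # Return extended CDS sequence without first stop codon
--         extended_seq += codon
--
--     return None  # No second stop codon found
-- ===== SOURCE B (Python) =====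
-- def extract_extended_cds(sequence, stop_pos):
--     """Extracts the extended CDS by continuing past the first stop codon until a second stop codon is found."""
--     stop_codons = {"TAA", "TAG", "TGA"}
--     n = len(sequence)
--     in_frame_stops = [j for j in range(stop_pos, n - 2)
--                       if (j - stop_pos) % 3 == 0 and sequence[j:j+3] in stop_codons]
--     if not in_frame_stops:
--         return None
--     cut = min(in_frame_stops)
--     return "".join(sequence[i:i+3] for i in range(stop_pos, cut, 3))
-- ===== Notes on version B (the rewrite author's own statement) =====
-- stated objective: alternative
-- what changed: Replaces A's single step-3 accumulate-with-early-exit walk by a global search: scan every position, collect the in-frame stop-codon positions, take their minimum as the cut, and rebuild the codon prefix before it in a second pass (no accumulator, no early exit).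
import Mathlib
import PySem

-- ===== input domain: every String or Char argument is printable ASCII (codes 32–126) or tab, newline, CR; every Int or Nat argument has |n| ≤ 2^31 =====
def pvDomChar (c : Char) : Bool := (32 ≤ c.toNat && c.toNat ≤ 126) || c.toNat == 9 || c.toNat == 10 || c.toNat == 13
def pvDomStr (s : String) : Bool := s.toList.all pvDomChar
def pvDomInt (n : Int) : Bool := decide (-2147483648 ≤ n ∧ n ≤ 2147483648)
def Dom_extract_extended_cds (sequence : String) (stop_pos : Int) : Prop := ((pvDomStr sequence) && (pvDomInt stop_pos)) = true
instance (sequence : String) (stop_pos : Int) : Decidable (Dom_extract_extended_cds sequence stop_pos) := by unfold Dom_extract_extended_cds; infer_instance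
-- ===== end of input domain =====

-- B replaces A's step-3 accumulate-with-early-exit walk by a global search: collect the
-- in-frame stop-codon positions over a step-1 scan, cut at their minimum, and rebuild the
-- codon prefix in a second pass (objective: alternative decomposition, same asymptotic cost).

-- stop-codon membership test (codon in {"TAA","TAG","TGA"}), shared primitive of both programs
def pvStop (c : List Char) : Bool := c == ['T','A','A'] || c == ['T','A','G'] || c == ['T','G','A']

-- ===== PORT A =====
-- the loop: for i in range(stop_pos, len-2, 3): codon = sequence[i:i+3]; early return on stop, else accumulate
def pvGoA (s : List Char) : List Int → List Char → Option String
  | [], _ => none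
  | i :: rest, acc =>
      let codon := PySem.List.slice s (some i) (some (i + 3))
      if pvStop codon then some (String.ofList acc)
      else pvGoA s rest (acc ++ codon)

def extract_extended_cds (sequence : String) (stop_pos : Int) : Option String :=
  pvGoA sequence.toList
    (PySem.List.pyRange stop_pos ((sequence.toList.length : Int) - 2) 3) []

-- ===== PORT B =====
def extract_extended_cds_alt (sequence : String) (stop_pos : Int) : Option String :=
  let s := sequence.toList
  let n : Int := s.length
  -- in_frame_stops = [j for j in range(stop_pos, n-2) if (j-stop_pos)%3 == 0 and s[j:j+3] in stops]
  let inFrameStops := (PySem.List.pyRange stop_pos (n - 2) 1).filter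
      (fun j => PySem.Int.mod (j - stop_pos) 3 == 0 &&
                pvStop (PySem.List.slice s (some j) (some (j + 3))))
  -- if not in_frame_stops: return None;  cut = min(in_frame_stops)
  match PySem.List.min? inFrameStops (fun x => x) with
  | none => none
  | some cut =>
      -- "".join(s[i:i+3] for i in range(stop_pos, cut, 3))
      some (String.ofList
        (((PySem.List.pyRange stop_pos cut 3).map
            (fun i => PySem.List.slice s (some i) (some (i + 3)))).flatten))

-- ===== PRECONDITION & SPEC =====
def Spec_extract_extended_cds (sequence : String) (stop_pos : Int) (out : Option String) : Prop := out = extract_extended_cds_alt sequence stop_pos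
instance (sequence : String) (stop_pos : Int) (out : Option String) : Decidable (Spec_extract_extended_cds sequence stop_pos out) := by unfold Spec_extract_extended_cds; infer_instance

-- ===== CLAIM (what is proved, stated in full; the proofs are below) =====
def Claim_equal_extract_extended_cds : Prop := ∀ (sequence : String) (stop_pos : Int), Dom_extract_extended_cds sequence stop_pos → Spec_extract_extended_cds sequence stop_pos (extract_extended_cds sequence stop_pos)

-- ===== LEMMAS AND PROOFS =====

-- range(a, b, 3): nil and cons unfoldings, and strict increase
theorem pvR3_nil (a b : Int) (h : b ≤ a) : PySem.List.pyRange a b 3 = [] := by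
  rw [PySem.List.pyRange_of_pos a b (by norm_num)]
  simp [if_neg (not_lt.mpr h)]

theorem pvR3_cons (a b : Int) (h : a < b) :
    PySem.List.pyRange a b 3 = a :: PySem.List.pyRange (a + 3) b 3 := by
  rw [PySem.List.pyRange_of_pos a b (by norm_num),
      PySem.List.pyRange_of_pos (a + 3) b (by norm_num)]
  have hcount : (if a < b then ((b - a + 3 - 1) / 3).toNat else 0)
      = (if a + 3 < b then ((b - (a + 3) + 3 - 1) / 3).toNat else 0) + 1 := by
    by_cases h2 : a + 3 < b <;> simp [h, h2] <;> omega
  rw [hcount, List.range_succ_eq_map]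
  simp [List.map_map, Function.comp]
  intro k hk
  ring

theorem pvR3_pairwise (a b : Int) : (PySem.List.pyRange a b 3).Pairwise (· < ·) := by
  rw [PySem.List.pyRange_of_pos a b (by norm_num)]
  exact List.pairwise_lt_range.map _ (by intro x y hxy; omega)

-- Python's % with modulus 3 is emod
theorem pvMod3 (x : Int) : PySem.Int.mod x 3 = x % 3 := by
  simp [PySem.Int.mod, Int.fmod_eq_emod]

-- alignment: the step-1 range filtered to (j - a) % 3 == 0 is the step-3 range
theorem pvAlign (a : Int) (P : Int → Bool) :
    ∀ (n : Nat) (c b : Int), (b - c).toNat ≤ n → (3 : Int) ∣ (c - a) →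
      (PySem.List.pyRange c b 1).filter
          (fun j => PySem.Int.mod (j - a) 3 == 0 && P j)
        = (PySem.List.pyRange c b 3).filter P := by
  intro n
  induction n with
  | zero =>
      intro c b hn _
      have hb : b ≤ c := by omega
      rw [PySem.List.pyRange_one_eq_nil hb, pvR3_nil c b hb]
      simp
  | succ n ih =>
      intro c b hn hdvd
      by_cases hcb : c < b
      · rw [PySem.List.pyRange_one_cons hcb, pvR3_cons c b hcb]
        have hc0 : PySem.Int.mod (c - a) 3 = 0 := by rw [pvMod3]; omega
        simp only [List.filter_cons, hc0]
        have htail :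
            (PySem.List.pyRange (c + 1) b 1).filter
                (fun j => PySem.Int.mod (j - a) 3 == 0 && P j)
              = (PySem.List.pyRange (c + 3) b 3).filter P := by
          by_cases h1 : c + 1 < b
          · rw [PySem.List.pyRange_one_cons h1]
            have hm1 : PySem.Int.mod (c + 1 - a) 3 = 1 := by rw [pvMod3]; omega
            simp only [List.filter_cons, hm1]
            have e1 : c + 1 + 1 = c + 2 := by ring
            rw [e1]
            by_cases h2 : c + 2 < b
            · rw [PySem.List.pyRange_one_cons h2]
              have hm2 : PySem.Int.mod (c + 2 - a) 3 = 2 := by rw [pvMod3]; omega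
              simp only [List.filter_cons, hm2]
              have e2 : c + 2 + 1 = c + 3 := by ring
              rw [e2]
              have := ih (c + 3) b (by omega) (by omega)
              simpa using this
            · rw [PySem.List.pyRange_one_eq_nil (by omega : b ≤ c + 2),
                  pvR3_nil (c + 3) b (by omega)]
              simp
          · rw [PySem.List.pyRange_one_eq_nil (by omega : b ≤ c + 1),
                pvR3_nil (c + 3) b (by omega)]
            simp
        rw [htail]
        simp
      · rw [PySem.List.pyRange_one_eq_nil (by omega), pvR3_nil c b (by omega)]
        simp

-- min of the filtered list of a strictly increasing list is its first match
theorem pvMinFilter (P : Int → Bool) :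
    ∀ (l : List Int), l.Pairwise (· < ·) →
      PySem.List.min? (l.filter P) (fun x => x) = l.find? P := by
  intro l hl
  induction l with
  | nil => rfl
  | cons a t ih =>
      have hat : ∀ y ∈ t, a < y := fun y hy => (List.pairwise_cons.mp hl).1 y hy
      have ht : t.Pairwise (· < ·) := (List.pairwise_cons.mp hl).2
      by_cases hPa : P a
      · have hfoldl : (t.filter P).foldl min a = a := by
          rcases PySem.List.foldl_min_mem (t.filter P) a with h | h
          · exact h
          · have h1 := (PySem.List.foldl_min_le (t.filter P) a).1
            have h2 := hat _ (List.mem_of_mem_filter h)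
            omega
        simp [hPa, PySem.List.min?_id_cons, hfoldl]
      · simp [hPa, ih ht]

-- A's early-exit loop is find-first-stop-then-join over the step-3 range
theorem pvGoA_eq (s : List Char) :
    ∀ (n : Nat) (a b : Int), (b - a).toNat ≤ n → ∀ (acc : List Char),
      pvGoA s (PySem.List.pyRange a b 3) acc =
        (match (PySem.List.pyRange a b 3).find?
            (fun i => pvStop (PySem.List.slice s (some i) (some (i + 3)))) with
         | none => none
         | some cut => some (String.ofList (acc ++
             ((PySem.List.pyRange a cut 3).map
                (fun i => PySem.List.slice s (some i) (some (i + 3)))).flatten))) := by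
  intro n
  induction n with
  | zero =>
      intro a b hn acc
      rw [pvR3_nil a b (by omega)]
      simp [pvGoA]
  | succ n ih =>
      intro a b hn acc
      by_cases hab : a < b
      · rw [pvR3_cons a b hab]
        by_cases hP : pvStop (PySem.List.slice s (some a) (some (a + 3)))
        · simp only [List.find?_cons, hP, pvGoA, if_true]
          rw [pvR3_nil a a (by omega)]
          simp
        · simp only [List.find?_cons, hP, pvGoA, if_false, Bool.false_eq_true]
          rw [ih (a + 3) b (by omega) (acc ++ PySem.List.slice s (some a) (some (a + 3)))]
          cases hfind : (PySem.List.pyRange (a + 3) b 3).find?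
              (fun i => pvStop (PySem.List.slice s (some i) (some (i + 3)))) with
          | none => simp
          | some cut =>
              have hcut : a < cut := by
                have hmem := List.mem_of_find?_eq_some hfind
                have := (PySem.List.mem_pyRange_iff_of_pos (by norm_num : (0:Int) < 3) cut).mp hmem
                omega
              simp [pvR3_cons a cut hcut]
      · rw [pvR3_nil a b (by omega)]
        simp [pvGoA]

-- ===== VERDICT (by name: the statement is the Claim_ definition above) =====
theorem extract_extended_cds_spec : Claim_equal_extract_extended_cds := by
  intro sequence stop_pos _
  unfold Spec_extract_extended_cds extract_extended_cds extract_extended_cds_alt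
  simp only []
  rw [pvGoA_eq sequence.toList ((((sequence.toList.length : Int) - 2) - stop_pos).toNat)
      stop_pos ((sequence.toList.length : Int) - 2) le_rfl []]
  rw [pvAlign stop_pos _ ((((sequence.toList.length : Int) - 2) - stop_pos).toNat)
      stop_pos ((sequence.toList.length : Int) - 2) le_rfl (by simp)]
  rw [pvMinFilter _ _ (pvR3_pairwise stop_pos ((sequence.toList.length : Int) - 2))]
  cases (PySem.List.pyRange stop_pos ((sequence.toList.length : Int) - 2) 3).find?
      (fun i => pvStop (PySem.List.slice sequence.toList (some i) (some (i + 3)))) with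
  | none => rfl
  | some cut => simp
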